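-- pv_equiv track=rewrite | github.com/KaleabTessera/KnapSackProblem | KnapsackProblem.py | finaAllSubsets
-- ===== SOURCE A (Python) =====
-- def findSubsets(allSubsets,subset,currentIndex,k):
--     if(len(subset) == currentIndex):
--         return allSubsets
--
--     newSet = []
--     for i in range(0,len(allSubsets)):
--       if(len(allSubsets[i]) < k):
--         newSet = allSubsets[i].copy()
--         newSet.append(subset[currentIndex])
--         allSubsets.append(newSet)
--
--     findSubsets(allSubsets, subset, currentIndex+1,k)
--
-- def finaAllSubsets(array, subsetSize,k):
--     allSubsets = [[]]
--     findSubsets(allSubsets,array,0,k)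
--     returnSet = []
--     for sets in allSubsets:
--         if(len(sets) == subsetSize):
--             returnSet.append(sets)
--     return returnSet
-- ===== SOURCE B (Python) =====
-- def finaAllSubsets(array, subsetSize, k):
--     if subsetSize > k:
--         return []
--     n = len(array)
--     result = []
--     for mask in range(1 << n):
--         if bin(mask).count("1") == subsetSize:
--             result.append([array[i] for i in range(n) if (mask >> i) & 1])
--     return result
-- ===== Notes on version B (the rewrite author's own statement) =====
-- stated objective: simpler
-- what changed: Replaced A's recursive in-place growth of a list of all partial subsets (re-scanning the growing list at each element) plus a final size filter by a single sweep over bitmasks 0..2^n-1 keeping masks whose popcount equals subsetSize, behind a plain subsetSize>k size cap; Pre_ excludes the degenerate corner subsetSize==0 with negative k, where A returns [[]] (the empty subset regardless of the cap) and B's cap returns [] -- both defensible.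
-- outside the precondition, e.g. on finaAllSubsets([1, 2], 0, -1): A returns [[]], B returns []
import Mathlib
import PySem

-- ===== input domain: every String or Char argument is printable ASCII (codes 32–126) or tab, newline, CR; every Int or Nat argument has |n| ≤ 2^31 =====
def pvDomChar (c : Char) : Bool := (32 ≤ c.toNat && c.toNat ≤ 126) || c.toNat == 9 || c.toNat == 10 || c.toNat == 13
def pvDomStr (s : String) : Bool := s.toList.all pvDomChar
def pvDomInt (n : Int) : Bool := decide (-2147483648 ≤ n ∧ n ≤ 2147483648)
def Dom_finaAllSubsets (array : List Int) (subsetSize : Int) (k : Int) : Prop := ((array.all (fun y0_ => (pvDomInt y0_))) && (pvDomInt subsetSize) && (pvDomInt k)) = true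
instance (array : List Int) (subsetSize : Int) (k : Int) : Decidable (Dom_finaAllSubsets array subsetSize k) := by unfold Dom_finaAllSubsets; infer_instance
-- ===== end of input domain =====

-- B replaces A's recursive grow-a-list-of-subsets construction by a single bitmask sweep
-- over range(2^n), keeping masks with the requested popcount, behind a plain subsetSize > k
-- size cap (objective: simpler).

-- ===== PORT A =====
-- body of A's `for i in range(0,len(allSubsets))` loop: the range is the snapshot taken at
-- loop entry, so the fold runs over the old list while appending extensions to it
def pvStepA (k : Int) (x : Int) (all : List (List Int)) : List (List Int) :=
  all.foldl (fun acc s => if (s.length : Int) < k then acc ++ [s ++ [x]] else acc) all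

-- A's recursive findSubsets (the Python mutates allSubsets in place; here the state is returned).
-- The final `else` branch is unreachable from the entry call currentIndex = 0 (totalization guard).
def pvFindSubsets (allSubsets : List (List Int)) (subset : List Int) (currentIndex : Nat) (k : Int) : List (List Int) :=
  if subset.length = currentIndex then allSubsets
  else if h : currentIndex < subset.length then
    pvFindSubsets (pvStepA k subset[currentIndex] allSubsets) subset (currentIndex + 1) k
  else allSubsets
termination_by subset.length - currentIndex

def finaAllSubsets (array : List Int) (subsetSize : Int) (k : Int) : List (List Int) :=
  let allSubsets := pvFindSubsets [[]] array 0 k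
  allSubsets.foldl (fun ret s => if (s.length : Int) = subsetSize then ret ++ [s] else ret) []

-- ===== PORT B =====
-- bin(mask).count("1"): number of 1-bits, extracted low bit first
def pvPopcount (n : Nat) : Nat :=
  if n = 0 then 0 else n % 2 + pvPopcount (n / 2)
decreasing_by exact Nat.div_lt_self (Nat.pos_of_ne_zero (by assumption)) (by norm_num)

-- [array[i] for i in range(len(array)) if (mask >> i) & 1]  (i is always in range, so [i]? = some)
def pvMaskPick (array : List Int) (mask : Nat) : List Int :=
  (List.range array.length).filterMap (fun i => if (mask >>> i) % 2 = 1 then array[i]? else none)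

def finaAllSubsets_alt (array : List Int) (subsetSize : Int) (k : Int) : List (List Int) :=
  if k < subsetSize then []
  else
    (List.range (2 ^ array.length)).foldl
      (fun res mask => if (pvPopcount mask : Int) = subsetSize then res ++ [pvMaskPick array mask] else res) []

-- ===== PRECONDITION & SPEC =====
-- Pre_ excludes the degenerate corner subsetSize = 0 with negative capacity k, where A returns
-- [[]] (the empty subset regardless of the cap) while B's subsetSize > k cap returns []; on this
-- unspecified corner either value is defensible.
def Pre_finaAllSubsets (array : List Int) (subsetSize : Int) (k : Int) : Prop :=
  ¬ (subsetSize = 0 ∧ k < 0)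
instance (array : List Int) (subsetSize : Int) (k : Int) : Decidable (Pre_finaAllSubsets array subsetSize k) := by unfold Pre_finaAllSubsets; infer_instance
def pvWitness_finaAllSubsets : List Int × Int × Int := ([1, 2, 3], 2, 2)

def Spec_finaAllSubsets (array : List Int) (subsetSize : Int) (k : Int) (out : List (List Int)) : Prop := out = finaAllSubsets_alt array subsetSize k
instance (array : List Int) (subsetSize : Int) (k : Int) (out : List (List Int)) : Decidable (Spec_finaAllSubsets array subsetSize k out) := by unfold Spec_finaAllSubsets; infer_instance

-- ===== CLAIM (what is proved, stated in full; the proofs are below) =====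
def Claim_equal_finaAllSubsets : Prop := ∀ (array : List Int) (subsetSize : Int) (k : Int), Dom_finaAllSubsets array subsetSize k → Pre_finaAllSubsets array subsetSize k → Spec_finaAllSubsets array subsetSize k (finaAllSubsets array subsetSize k)

-- ===== LEMMAS AND PROOFS =====

-- generic shape of both 'append-if' loops
theorem pvFoldlAppendIte {α β : Type} (p : α → Prop) [DecidablePred p] (f : α → β)
    (l : List α) (acc : List β) :
    l.foldl (fun a s => if p s then a ++ [f s] else a) acc
      = acc ++ l.filterMap (fun s => if p s then some (f s) else none) := by
  induction l generalizing acc with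
  | nil => simp
  | cons y ys ih =>
    by_cases hp : p y <;> simp [hp, ih]

-- the state A reaches after absorbing xs: subsets of masks 0..2^n-1 of popcount ≤ k.toNat
def pvSpecState (xs : List Int) (k : Int) : List (List Int) :=
  (List.range (2 ^ xs.length)).filterMap
    (fun m => if pvPopcount m ≤ k.toNat then some (pvMaskPick xs m) else none)

theorem pvPopcount_zero : pvPopcount 0 = 0 := by simp [pvPopcount]

theorem pvPopcount_high (n m : Nat) (h : m < 2 ^ n) :
    pvPopcount (2 ^ n + m) = pvPopcount m + 1 := by
  induction n generalizing m with
  | zero =>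
    have : m = 0 := by norm_num at h; omega
    subst this
    simp [pvPopcount]
  | succ n ih =>
    rw [pvPopcount]
    have h2 : 2 ^ (n + 1) + m = 2 * (2 ^ n) + m := by ring_nf
    have hm2 : m / 2 < 2 ^ n := by
      have := Nat.pow_succ 2 n
      omega
    have hne : ¬ (2 ^ (n + 1) + m = 0) := by positivity
    simp only [hne, if_false]
    have e1 : (2 ^ (n + 1) + m) % 2 = m % 2 := by omega
    have e2 : (2 ^ (n + 1) + m) / 2 = 2 ^ n + m / 2 := by omega
    rw [e1, e2, ih _ hm2]
    conv_rhs => rw [pvPopcount]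
    by_cases hm : m = 0
    · simp [hm, pvPopcount_zero]
    · simp [hm]; omega

theorem pvMaskPick_low (xs : List Int) (x : Int) (m : Nat) (h : m < 2 ^ xs.length) :
    pvMaskPick (xs ++ [x]) m = pvMaskPick xs m := by
  unfold pvMaskPick
  rw [List.length_append, List.length_cons, List.length_nil]
  rw [List.range_add, List.filterMap_append]
  have hhigh : (List.range 1).map (xs.length + ·) = [xs.length] := by simp
  rw [hhigh]
  have hbit : (m >>> xs.length) % 2 = 0 := by
    rw [Nat.shiftRight_eq_div_pow]
    have : m / 2 ^ xs.length = 0 := Nat.div_eq_of_lt h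
    simp [this]
  have h2 : List.filterMap (fun i => if (m >>> i) % 2 = 1 then (xs ++ [x])[i]? else none) [xs.length] = [] := by
    simp [hbit]
  rw [h2, List.append_nil]
  apply List.filterMap_congr
  intro i hi
  rw [List.mem_range] at hi
  rw [List.getElem?_append_left hi]

theorem pvMaskPick_high (xs : List Int) (x : Int) (m : Nat) (h : m < 2 ^ xs.length) :
    pvMaskPick (xs ++ [x]) (2 ^ xs.length + m) = pvMaskPick xs m ++ [x] := by
  unfold pvMaskPick
  rw [List.length_append, List.length_cons, List.length_nil]
  rw [List.range_add, List.filterMap_append]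
  have hhigh : (List.range 1).map (xs.length + ·) = [xs.length] := by simp
  rw [hhigh]
  have hbit : ((2 ^ xs.length + m) >>> xs.length) % 2 = 1 := by
    rw [Nat.shiftRight_eq_div_pow]
    have hd : (2 ^ xs.length + m) / 2 ^ xs.length = 1 + m / 2 ^ xs.length := by
      rw [Nat.add_div_left _ (Nat.two_pow_pos _)]; omega
    have : m / 2 ^ xs.length = 0 := Nat.div_eq_of_lt h
    omega
  have h2 : List.filterMap (fun i => if ((2 ^ xs.length + m) >>> i) % 2 = 1 then (xs ++ [x])[i]? else none) [xs.length] = [x] := by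
    simp [hbit]
  rw [h2]
  congr 1
  apply List.filterMap_congr
  intro i hi
  rw [List.mem_range] at hi
  have hbi : ((2 ^ xs.length + m) >>> i) % 2 = (m >>> i) % 2 := by
    rw [Nat.shiftRight_eq_div_pow, Nat.shiftRight_eq_div_pow]
    have hdvd : 2 ^ i ∣ 2 ^ xs.length := pow_dvd_pow 2 (le_of_lt hi)
    obtain ⟨c, hc⟩ := hdvd
    have hceven : c % 2 = 0 := by
      have : 2 ^ xs.length = 2 ^ i * 2 ^ (xs.length - i) := by
        rw [← pow_add]; congr 1; omega
      have h2c : c = 2 ^ (xs.length - i) := by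
        have hpos : 0 < 2 ^ i := Nat.two_pow_pos _
        exact Nat.eq_of_mul_eq_mul_left hpos (by omega)
      have : 1 ≤ xs.length - i := by omega
      rw [h2c]
      have : 2 ^ (xs.length - i) = 2 * 2 ^ (xs.length - i - 1) := by
        rw [← pow_succ']; congr 1; omega
      omega
    rw [hc]
    have hdiv : (2 ^ i * c + m) / 2 ^ i = c + m / 2 ^ i := by
      rw [Nat.mul_add_div (Nat.two_pow_pos _)]
    rw [hdiv]
    omega
  rw [hbi, List.getElem?_append_left hi]

theorem pvMaskPick_nil : pvMaskPick [] 0 = [] := by simp [pvMaskPick]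

theorem pvMaskPick_length (xs : List Int) : ∀ m, m < 2 ^ xs.length →
    (pvMaskPick xs m).length = pvPopcount m := by
  induction xs using List.reverseRecOn with
  | nil =>
    intro m hm
    have : m = 0 := by norm_num at hm; omega
    subst this
    simp [pvMaskPick_nil, pvPopcount_zero]
  | append_singleton ys y ih =>
    intro m hm
    rw [List.length_append, List.length_cons, List.length_nil, pow_succ] at hm
    by_cases hlo : m < 2 ^ ys.length
    · rw [pvMaskPick_low ys y m hlo, ih m hlo]
    · have hm' : m - 2 ^ ys.length < 2 ^ ys.length := by omega
      have hme : m = 2 ^ ys.length + (m - 2 ^ ys.length) := by omega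
      rw [hme, pvMaskPick_high ys y _ hm', pvPopcount_high _ _ hm']
      rw [List.length_append, List.length_cons, List.length_nil, ih _ hm']

theorem pvStepA_spec (k x : Int) (xs : List Int) :
    pvStepA k x (pvSpecState xs k) = pvSpecState (xs ++ [x]) k := by
  unfold pvStepA
  rw [pvFoldlAppendIte (fun s : List Int => (s.length : Int) < k) (fun s => s ++ [x])]
  unfold pvSpecState
  rw [List.filterMap_filterMap]
  rw [List.length_append, List.length_cons, List.length_nil, pow_succ, mul_two, List.range_add,
    List.filterMap_append, List.filterMap_map]
  congr 1
  · apply List.filterMap_congr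
    intro m hm
    rw [List.mem_range] at hm
    by_cases hp : pvPopcount m ≤ k.toNat <;> simp [hp, pvMaskPick_low xs x m hm]
  · apply List.filterMap_congr
    intro m hm
    rw [List.mem_range] at hm
    simp only [Function.comp]
    by_cases hp : pvPopcount m ≤ k.toNat
    · simp only [hp, if_true, Option.bind_some]
      rw [pvMaskPick_length xs m hm]
      by_cases hlt : (pvPopcount m : Int) < k
      · have h1 : pvPopcount (2 ^ xs.length + m) ≤ k.toNat := by
          rw [pvPopcount_high _ _ hm]; omega
        simp [hlt, h1, pvMaskPick_high xs x m hm]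
      · have h1 : ¬ pvPopcount (2 ^ xs.length + m) ≤ k.toNat := by
          rw [pvPopcount_high _ _ hm]; omega
        simp [hlt, h1]
    · have h1 : ¬ pvPopcount (2 ^ xs.length + m) ≤ k.toNat := by
        rw [pvPopcount_high _ _ hm]; omega
      simp [hp, h1]

theorem pvSpecState_nil (k : Int) : pvSpecState [] k = [[]] := by
  simp [pvSpecState, pvPopcount_zero, pvMaskPick_nil]

theorem pvFindSubsets_eq_foldl (subset : List Int) (k : Int) : ∀ i, ∀ all, i ≤ subset.length →
    pvFindSubsets all subset i k
      = (subset.drop i).foldl (fun a x => pvStepA k x a) all := by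
  intro i
  induction hn : subset.length - i generalizing i with
  | zero =>
    intro all hi
    have heq : subset.length = i := by omega
    have hd : subset.drop i = [] := List.drop_eq_nil_of_le (by omega)
    rw [pvFindSubsets]
    simp [heq, hd]
  | succ n ih =>
    intro all hi
    have hlt : i < subset.length := by omega
    rw [pvFindSubsets]
    have hne : ¬ subset.length = i := by omega
    simp only [hne, if_false, hlt, dif_pos]
    rw [ih (i + 1) (by omega) _ (by omega)]
    conv_rhs => rw [List.drop_eq_getElem_cons hlt]
    rw [List.foldl_cons]

theorem pvState_spec (xs : List Int) (k : Int) :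
    pvFindSubsets [[]] xs 0 k = pvSpecState xs k := by
  rw [pvFindSubsets_eq_foldl xs k 0 [[]] (by omega), List.drop_zero, ← pvSpecState_nil k]
  induction xs using List.reverseRecOn with
  | nil => simp
  | append_singleton ys y ih =>
    rw [List.foldl_append, ih, List.foldl_cons, List.foldl_nil, pvStepA_spec]

-- ===== VERDICT (by name: the statement is the Claim_ definition above) =====
theorem finaAllSubsets_spec : Claim_equal_finaAllSubsets := by
  intro array subsetSize k _ hpre
  unfold Pre_finaAllSubsets at hpre
  unfold Spec_finaAllSubsets finaAllSubsets finaAllSubsets_alt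
  rw [pvState_spec]
  rw [pvFoldlAppendIte (fun s : List Int => (s.length : Int) = subsetSize) (fun s => s)]
  rw [pvFoldlAppendIte (fun m : Nat => (pvPopcount m : Int) = subsetSize) (fun m => pvMaskPick array m)]
  unfold pvSpecState
  rw [List.filterMap_filterMap]
  simp only [List.nil_append]
  by_cases hg : k < subsetSize
  · rw [if_pos hg]
    rw [List.filterMap_eq_nil_iff]
    intro m hm
    rw [List.mem_range] at hm
    by_cases hp : pvPopcount m ≤ k.toNat
    · simp only [hp, if_true, Option.bind_some]
      rw [pvMaskPick_length array m hm]
      have : ¬ (pvPopcount m : Int) = subsetSize := by omega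
      simp [this]
    · simp [hp]
  · rw [if_neg hg]
    apply List.filterMap_congr
    intro m hm
    rw [List.mem_range] at hm
    by_cases hs : (pvPopcount m : Int) = subsetSize
    · have hp : pvPopcount m ≤ k.toNat := by omega
      simp [hs, hp, pvMaskPick_length array m hm]
    · by_cases hp : pvPopcount m ≤ k.toNat
      · simp only [hp, if_true, Option.bind_some]
        rw [pvMaskPick_length array m hm]
      · simp [hp, hs]
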